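-- pv_equiv track=rewrite | github.com/GlacyalWolf/programingAlgoritms2 | Examen_2021/randomWalker.py | walker
-- ===== SOURCE A (Python) =====
-- def walker(x,y,steps):
--     '''
--     >>> walker(4, 1, 'NEENWNWWS')
--     (3, 3)
--     >>> walker(3, 5, 'NESW')
--     (3, 5)
--     >>> walker(0, 4, 'SSSSEWEWNNNN')
--     (0, 4)
--     >>> walker(0, 0, 'SWSWNES')
--     (-1, -2)
--     >>> walker(6, 3, '')
--     (6, 3)
--     '''
--     for i in steps:
--         if(i=="N"):
--             y=y+1;
--         elif(i=="S"):
--             y=y-1;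
--         elif(i=="E"):
--             x=x+1;
--         elif(i=="W"):
--             x=x-1;
--     return (x,y);
-- ===== SOURCE B (Python) =====
-- def walker(x, y, steps):
--     # Tabulate-then-combine: count each direction once, return closed-form result.
--     return (x + steps.count("E") - steps.count("W"),
--             y + steps.count("N") - steps.count("S"))
-- ===== Notes on version B (the rewrite author's own statement) =====
-- stated objective: faster
-- what changed: Replaced the per-character branching state update with a tabulate-then-combine computation: count each direction letter once with str.count and return the final position as a closed-form expression.
import Mathlib
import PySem

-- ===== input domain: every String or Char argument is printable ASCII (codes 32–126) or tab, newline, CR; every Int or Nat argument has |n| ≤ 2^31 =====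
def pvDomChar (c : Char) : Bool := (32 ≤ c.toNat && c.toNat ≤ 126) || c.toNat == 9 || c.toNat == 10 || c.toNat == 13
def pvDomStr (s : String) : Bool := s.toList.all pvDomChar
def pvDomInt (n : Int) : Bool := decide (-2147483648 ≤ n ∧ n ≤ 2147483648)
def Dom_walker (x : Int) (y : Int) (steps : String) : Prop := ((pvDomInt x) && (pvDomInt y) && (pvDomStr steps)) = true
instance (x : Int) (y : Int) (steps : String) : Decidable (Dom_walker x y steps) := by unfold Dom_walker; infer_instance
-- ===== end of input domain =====

-- ===== PORT A =====
-- A: per-character state update (literal transliteration of the Python loop)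
def walkStep (p : Int × Int) (c : Char) : Int × Int :=
  if c = 'N' then (p.1, p.2 + 1)
  else if c = 'S' then (p.1, p.2 - 1)
  else if c = 'E' then (p.1 + 1, p.2)
  else if c = 'W' then (p.1 - 1, p.2)
  else p

def walker (x : Int) (y : Int) (steps : String) : Int × Int :=
  steps.toList.foldl walkStep (x, y)

-- ===== PORT B =====
-- B: count each direction letter once (str.count on a single char), closed-form combine
def walker_alt (x : Int) (y : Int) (steps : String) : Int × Int :=
  (x + (steps.toList.count 'E' : Int) - (steps.toList.count 'W' : Int),
   y + (steps.toList.count 'N' : Int) - (steps.toList.count 'S' : Int))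

-- ===== PRECONDITION & SPEC =====
def Spec_walker (x : Int) (y : Int) (steps : String) (out : Int × Int) : Prop := out = walker_alt x y steps
instance (x : Int) (y : Int) (steps : String) (out : Int × Int) : Decidable (Spec_walker x y steps out) := by unfold Spec_walker; infer_instance

-- ===== CLAIM (what is proved, stated in full; the proofs are below) =====
def Claim_equal_walker : Prop := ∀ (x : Int) (y : Int) (steps : String), Dom_walker x y steps → Spec_walker x y steps (walker x y steps)

-- ===== LEMMAS AND PROOFS =====
theorem walker_foldl_counts (l : List Char) (x y : Int) :
    l.foldl walkStep (x, y) =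
      (x + (l.count 'E' : Int) - (l.count 'W' : Int),
       y + (l.count 'N' : Int) - (l.count 'S' : Int)) := by
  induction l generalizing x y with
  | nil => simp
  | cons c l ih =>
    simp only [List.foldl_cons, walkStep]
    split_ifs with h1 h2 h3 h4 <;>
      simp_all [List.count_cons] <;> omega

-- ===== VERDICT (by name: the statement is the Claim_ definition above) =====
theorem walker_spec : Claim_equal_walker := by
  intro x y steps _
  unfold Spec_walker walker walker_alt
  exact walker_foldl_counts _ x y
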